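-- pv_equiv track=rewrite | github.com/Vitor-Sallenave/Algorithms-and-Data-Structures-2 | Tasks/EC1/questao1.py | Contagem
-- ===== SOURCE A (Python) =====
-- def Contagem(vet):
--     # Verificando se t vetor é vazio
--     if len(vet) != 0:
--         # Verificando se t vetor é único
--         if len(vet) == 1:
--             return vet[0]
--         else:
--             if vet[len(vet) - 1] == 1:
--                 return Contagem(vet[:len(vet) - 1]) + 1
--             else:
--                 return Contagem(vet[:len(vet) - 1])
-- ===== SOURCE B (Python) =====
-- def Contagem(vet):
--     # Iterative re-implementation: accumulator instead of recursion on a shrinking slice.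
--     if len(vet) == 0:
--         return None
--     total = vet[0]
--     for x in vet[1:]:
--         if x == 1:
--             total += 1
--     return total
-- ===== Notes on version B (the rewrite author's own statement) =====
-- stated objective: faster
-- what changed: Replaced the recursion over a shrinking copy-slice vet[:-1] (quadratic slice copying) with a single explicit accumulator loop over vet[1:].
-- outside the precondition, e.g. on Contagem([]): A returns None, B returns None
import Mathlib
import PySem

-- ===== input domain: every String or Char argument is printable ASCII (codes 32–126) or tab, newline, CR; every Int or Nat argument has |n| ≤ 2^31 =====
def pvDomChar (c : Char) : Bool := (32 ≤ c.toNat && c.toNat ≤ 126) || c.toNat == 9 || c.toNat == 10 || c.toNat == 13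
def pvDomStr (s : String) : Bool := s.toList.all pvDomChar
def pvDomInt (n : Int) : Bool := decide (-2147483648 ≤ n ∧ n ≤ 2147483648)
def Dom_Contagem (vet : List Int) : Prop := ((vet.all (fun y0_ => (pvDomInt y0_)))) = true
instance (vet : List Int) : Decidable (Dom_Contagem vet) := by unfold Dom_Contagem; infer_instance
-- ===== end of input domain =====

-- B replaces A's recursion on the copy-slice vet[:-1] with one accumulator loop over vet[1:] (objective: simpler).

-- ===== PORT A =====
-- A's recursion: vet[:len(vet)-1] is vet.dropLast (exact, as len(vet)-1 ≥ 1 in this branch),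
-- vet[len(vet)-1] is the last element (index in range here), vet[0] the head.
def Contagem (vet : List Int) : Int :=
  if vet.length ≠ 0 then
    if vet.length == 1 then vet.headD 0
    else
      if vet.getLastD 0 == 1 then Contagem vet.dropLast + 1
      else Contagem vet.dropLast
  else 0  -- Python A falls through and returns None here; excluded by Pre_Contagem
termination_by vet.length
decreasing_by all_goals { simp [List.length_dropLast]; omega }

-- ===== PORT B =====
def Contagem_alt (vet : List Int) : Int :=
  match vet with
  | [] => 0  -- Python B returns None here; excluded by Pre_Contagem
  | h :: t => t.foldl (fun total x => if x == 1 then total + 1 else total) h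

-- ===== PRECONDITION & SPEC =====
-- Pre_ excludes only the empty list, on which both Pythons return None (not an int).
def Pre_Contagem (vet : List Int) : Prop := vet ≠ []
instance (vet : List Int) : Decidable (Pre_Contagem vet) := by unfold Pre_Contagem; infer_instance
def pvWitness_Contagem : List Int := ([3, 1, 0, 1] : List Int)
def Spec_Contagem (vet : List Int) (out : Int) : Prop := out = Contagem_alt vet
instance (vet : List Int) (out : Int) : Decidable (Spec_Contagem vet out) := by unfold Spec_Contagem; infer_instance

-- ===== CLAIM (what is proved, stated in full; the proofs are below) =====
def Claim_equal_Contagem : Prop := ∀ (vet : List Int), Dom_Contagem vet → Pre_Contagem vet → Spec_Contagem vet (Contagem vet)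

-- ===== LEMMAS AND PROOFS =====
theorem Contagem_cons (h : Int) (t : List Int) :
    Contagem (h :: t) = Contagem_alt (h :: t) := by
  induction t using List.reverseRecOn with
  | nil => simp [Contagem, Contagem_alt]
  | append_singleton s x ih =>
      rw [Contagem]
      have hlen : (h :: (s ++ [x])).length ≠ 0 := by simp
      have hlen1 : ((h :: (s ++ [x])).length == 1) = false := by
        simp [List.length_append]
      have hdrop : (h :: (s ++ [x])).dropLast = h :: s := by
        rw [show h :: (s ++ [x]) = (h :: s) ++ [x] by simp, List.dropLast_concat]
      have hlast : (h :: (s ++ [x])).getLastD 0 = x := by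
        rw [show h :: (s ++ [x]) = (h :: s) ++ [x] by simp]
        simp [List.getLastD]
      simp only [hlen, hlen1, hdrop, hlast, if_true, Bool.false_eq_true, if_false, ite_not]
      simp only [Contagem_alt] at ih ⊢
      rw [List.foldl_append]
      simp only [List.foldl]
      by_cases hx : x = 1 <;> simp [hx, ih]

-- ===== VERDICT (by name: the statement is the Claim_ definition above) =====
theorem Contagem_spec : Claim_equal_Contagem := by
  intro vet _ hpre
  unfold Spec_Contagem
  match vet with
  | [] => exact absurd rfl hpre
  | h :: t => exact Contagem_cons h t
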